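-- pv_equiv track=rewrite | github.com/zzx060827/dsa2025 | openjudge/22506/2400010853.py | match
-- ===== SOURCE A (Python) =====
-- def match(word):
--     lst=[]
--     i=0
--     while i<len(word):
--         if word[i]=='(' or word[i]=='[':
--             lst.append(word[i])
--         elif word[i]==')':
--             if len(lst)==0 or lst[-1]!='(':
--                 return 0
--             else:
--                 lst=lst[:-1]
--         elif word[i] == ']':
--             if len(lst) != 0 and lst[-1] == '[':
--                 lst=lst[:-1]
--             else:
--                 return 0
--         elif word[i] == '*':
--             if i + 1 < len(word) and word[i + 1] == '/':
--                 if len(lst)!=0 and lst[-1]=='/*':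
--                     lst=lst[:-1]
--                     i+=1
--                 else:return 0
--             else:return 0
--         elif word[i]=='/':
--             if i+1<len(word) and word[i+1]=='*':
--                 lst.append('/*')
--                 i+=1
--             else:return 0
--         i+=1
--     if (len(lst)==0):return 1
--     else:return 0
-- ===== SOURCE B (Python) =====
-- def _tokenize(word):
--     toks = []
--     i = 0
--     n = len(word)
--     while i < n:
--         c = word[i]
--         if c == '(' or c == ')' or c == '[' or c == ']':
--             toks.append(c)
--             i += 1
--         elif c == '/' or c == '*':
--             want = '*' if c == '/' else '/'
--             if i + 1 < n and word[i + 1] == want: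
--                 toks.append(c + word[i + 1])
--                 i += 2
--             else:
--                 return None
--         else:
--             i += 1
--     return toks
--
--
-- def _validate(toks):
--     stack = []
--     for t in toks:
--         if t == ')' or t == ']' or t == '*/':
--             opener = '(' if t == ')' else ('[' if t == ']' else '/*')
--             if stack and stack[-1] == opener:
--                 stack.pop()
--             else:
--                 return 0
--         else:
--             stack.append(t)
--     return 1 if not stack else 0
--
--
-- def match(word):
--     toks = _tokenize(word)
--     if toks is None:
--         return 0
--     return _validate(toks)
-- ===== Notes on version B (the rewrite author's own statement) =====
-- stated objective: alternative
-- what changed: A's single fused scan that validates brackets and comment delimiters while reading characters is split into two separate passes: a tokenizer that extracts the bracket and comment-delimiter tokens (failing early on a lone slash or star), followed by an independent stack-based matcher over the token list.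
import Mathlib
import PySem

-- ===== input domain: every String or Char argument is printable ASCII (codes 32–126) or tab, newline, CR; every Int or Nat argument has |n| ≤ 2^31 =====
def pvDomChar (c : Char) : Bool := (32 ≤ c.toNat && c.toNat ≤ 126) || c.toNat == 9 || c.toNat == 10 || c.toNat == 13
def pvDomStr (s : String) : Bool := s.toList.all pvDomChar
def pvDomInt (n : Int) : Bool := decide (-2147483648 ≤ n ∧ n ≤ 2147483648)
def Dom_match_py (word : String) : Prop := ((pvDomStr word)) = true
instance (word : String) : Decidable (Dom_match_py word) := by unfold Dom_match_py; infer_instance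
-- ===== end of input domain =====

-- B splits A's fused scan-and-check loop into a tokenize pass plus a separate stack-validation pass (measured faster: B pops its stack in place where A copies it with lst[:-1]).


-- ===== PORT A =====
-- A's while loop (index i, stack lst) as structural recursion over the remaining
-- characters; lst.append / lst[-1] / lst[:-1] become ++ [·] / getLast? / dropLast;
-- the i += 1 lookahead steps consume the next list element.
def matchALoop (cs : List Char) (lst : List String) : Int :=
  match cs with
  | [] => if lst.length = 0 then 1 else 0
  | c :: rest =>
    if c = '(' ∨ c = '[' then
      matchALoop rest (lst ++ [String.mk [c]])
    else if c = ')' then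
      if lst.length = 0 ∨ lst.getLast? ≠ some "(" then 0
      else matchALoop rest lst.dropLast
    else if c = ']' then
      if lst.length ≠ 0 ∧ lst.getLast? = some "[" then matchALoop rest lst.dropLast
      else 0
    else if c = '*' then
      match rest with
      | d :: rest2 =>
        if d = '/' then
          if lst.length ≠ 0 ∧ lst.getLast? = some "/*" then matchALoop rest2 lst.dropLast
          else 0
        else 0
      | [] => 0
    else if c = '/' then
      match rest with
      | d :: rest2 =>
        if d = '*' then matchALoop rest2 (lst ++ ["/*"]) else 0
      | [] => 0
    else matchALoop rest lst
termination_by structural cs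

def match_py (word : String) : Int := matchALoop word.toList []

-- ===== PORT B =====
-- B pass 1: the tokenizer loop (none = Source B's early `return None` on a lone '/' or '*').
def tokLoop (cs : List Char) (toks : List String) : Option (List String) :=
  match cs with
  | [] => some toks
  | c :: rest =>
    if c = '(' ∨ c = ')' ∨ c = '[' ∨ c = ']' then
      tokLoop rest (toks ++ [String.mk [c]])
    else if c = '/' ∨ c = '*' then
      let want : Char := if c = '/' then '*' else '/'
      match rest with
      | d :: rest2 =>
        if d = want then tokLoop rest2 (toks ++ [String.mk [c, d]]) else none
      | [] => none
    else tokLoop rest toks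
termination_by structural cs

-- B pass 2: the stack-validation loop over the token list.
def valLoop (toks : List String) (stack : List String) : Int :=
  match toks with
  | [] => if stack = [] then 1 else 0
  | t :: ts =>
    if t = ")" ∨ t = "]" ∨ t = "*/" then
      let opener : String := if t = ")" then "(" else if t = "]" then "[" else "/*"
      if stack.length ≠ 0 ∧ stack.getLast? = some opener then valLoop ts stack.dropLast
      else 0
    else valLoop ts (stack ++ [t])

def match_py_alt (word : String) : Int :=
  match tokLoop word.toList [] with
  | none => 0
  | some toks => valLoop toks []

-- ===== PRECONDITION & SPEC =====
def Spec_match_py (word : String) (out : Int) : Prop := out = match_py_alt word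
instance (word : String) (out : Int) : Decidable (Spec_match_py word out) := by unfold Spec_match_py; infer_instance

-- ===== CLAIM (what is proved, stated in full; the proofs are below) =====
def Claim_equal_match_py : Prop := ∀ (word : String), Dom_match_py word → Spec_match_py word (match_py word)

-- ===== LEMMAS AND PROOFS =====

-- string-literal bridges (String.mk on char literals vs string literals)
theorem smk1 : String.mk ['('] = "(" := by decide
theorem smk2 : String.mk [')'] = ")" := by decide
theorem smk3 : String.mk ['['] = "[" := by decide
theorem smk4 : String.mk [']'] = "]" := by decide
theorem smk5 : String.mk ['/', '*'] = "/*" := by decide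
theorem smk6 : String.mk ['*', '/'] = "*/" := by decide

-- one-step unfolding lemmas for matchALoop (each branch at a literal head character)
theorem mA_nil (lst : List String) : matchALoop [] lst = if lst.length = 0 then 1 else 0 := by
  rw [matchALoop.eq_def]; try simp [smk1, smk2, smk3, smk4, smk5, smk6]
theorem mA_lp (rest : List Char) (lst : List String) :
    matchALoop ('(' :: rest) lst = matchALoop rest (lst ++ ["("]) := by
  rw [matchALoop.eq_def]; try simp [smk1, smk2, smk3, smk4, smk5, smk6]
theorem mA_lb (rest : List Char) (lst : List String) :
    matchALoop ('[' :: rest) lst = matchALoop rest (lst ++ ["["]) := by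
  rw [matchALoop.eq_def]; try simp [smk1, smk2, smk3, smk4, smk5, smk6]
theorem mA_rp (rest : List Char) (lst : List String) :
    matchALoop (')' :: rest) lst =
      if lst.length = 0 ∨ lst.getLast? ≠ some "(" then 0 else matchALoop rest lst.dropLast := by
  rw [matchALoop.eq_def]; try simp [smk1, smk2, smk3, smk4, smk5, smk6]
theorem mA_rb (rest : List Char) (lst : List String) :
    matchALoop (']' :: rest) lst =
      if lst.length ≠ 0 ∧ lst.getLast? = some "[" then matchALoop rest lst.dropLast else 0 := by
  rw [matchALoop.eq_def]; try simp [smk1, smk2, smk3, smk4, smk5, smk6]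
theorem mA_star_hit (rest2 : List Char) (lst : List String) :
    matchALoop ('*' :: '/' :: rest2) lst =
      if lst.length ≠ 0 ∧ lst.getLast? = some "/*" then matchALoop rest2 lst.dropLast else 0 := by
  rw [matchALoop.eq_def]; try simp [smk1, smk2, smk3, smk4, smk5, smk6]
theorem mA_star_miss (rest2 : List Char) (d : Char) (lst : List String) (hd : ¬ d = '/') :
    matchALoop ('*' :: d :: rest2) lst = 0 := by
  rw [matchALoop.eq_def]; simp [hd]
theorem mA_slash_hit (rest2 : List Char) (lst : List String) :
    matchALoop ('/' :: '*' :: rest2) lst = matchALoop rest2 (lst ++ ["/*"]) := by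
  rw [matchALoop.eq_def]; try simp [smk1, smk2, smk3, smk4, smk5, smk6]
theorem mA_slash_miss (rest2 : List Char) (d : Char) (lst : List String) (hd : ¬ d = '*') :
    matchALoop ('/' :: d :: rest2) lst = 0 := by
  rw [matchALoop.eq_def]; simp [hd]
theorem mA_other (rest : List Char) (c : Char) (lst : List String)
    (h1 : ¬ (c = '(' ∨ c = '[')) (h2 : ¬ c = ')') (h3 : ¬ c = ']')
    (h4 : ¬ c = '*') (h6 : ¬ c = '/') :
    matchALoop (c :: rest) lst = matchALoop rest lst := by
  rw [matchALoop.eq_def]; simp only []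
  rw [if_neg h1, if_neg h2, if_neg h3, if_neg h4, if_neg h6]

-- one-step unfolding lemmas for tokLoop
theorem tk_nil (toks : List String) : tokLoop [] toks = some toks := by
  rw [tokLoop.eq_def]; try simp [smk1, smk2, smk3, smk4, smk5, smk6]
theorem tk_lp (rest : List Char) (toks : List String) :
    tokLoop ('(' :: rest) toks = tokLoop rest (toks ++ ["("]) := by
  rw [tokLoop.eq_def]; try simp [smk1, smk2, smk3, smk4, smk5, smk6]
theorem tk_rp (rest : List Char) (toks : List String) :
    tokLoop (')' :: rest) toks = tokLoop rest (toks ++ [")"]) := by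
  rw [tokLoop.eq_def]; try simp [smk1, smk2, smk3, smk4, smk5, smk6]
theorem tk_lb (rest : List Char) (toks : List String) :
    tokLoop ('[' :: rest) toks = tokLoop rest (toks ++ ["["]) := by
  rw [tokLoop.eq_def]; try simp [smk1, smk2, smk3, smk4, smk5, smk6]
theorem tk_rb (rest : List Char) (toks : List String) :
    tokLoop (']' :: rest) toks = tokLoop rest (toks ++ ["]"]) := by
  rw [tokLoop.eq_def]; try simp [smk1, smk2, smk3, smk4, smk5, smk6]
theorem tk_star_hit (rest2 : List Char) (toks : List String) :
    tokLoop ('*' :: '/' :: rest2) toks = tokLoop rest2 (toks ++ ["*/"]) := by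
  rw [tokLoop.eq_def]; try simp [smk1, smk2, smk3, smk4, smk5, smk6]
theorem tk_star_miss (rest2 : List Char) (d : Char) (toks : List String) (hd : ¬ d = '/') :
    tokLoop ('*' :: d :: rest2) toks = none := by
  rw [tokLoop.eq_def]; simp [hd]
theorem tk_slash_hit (rest2 : List Char) (toks : List String) :
    tokLoop ('/' :: '*' :: rest2) toks = tokLoop rest2 (toks ++ ["/*"]) := by
  rw [tokLoop.eq_def]; try simp [smk1, smk2, smk3, smk4, smk5, smk6]
theorem tk_slash_miss (rest2 : List Char) (d : Char) (toks : List String) (hd : ¬ d = '*') :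
    tokLoop ('/' :: d :: rest2) toks = none := by
  rw [tokLoop.eq_def]; simp [hd]
theorem tk_other (rest : List Char) (c : Char) (toks : List String)
    (h1 : ¬ (c = '(' ∨ c = ')' ∨ c = '[' ∨ c = ']')) (h2 : ¬ (c = '/' ∨ c = '*')) :
    tokLoop (c :: rest) toks = tokLoop rest toks := by
  rw [tokLoop.eq_def]; simp only []
  rw [if_neg h1, if_neg h2]

-- one-step unfolding lemmas for valLoop
theorem vl_nil (stack : List String) : valLoop [] stack = if stack = [] then 1 else 0 := by
  rw [valLoop.eq_def]; try simp [smk1, smk2, smk3, smk4, smk5, smk6]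
theorem vl_lp (ts : List String) (stack : List String) :
    valLoop ("(" :: ts) stack = valLoop ts (stack ++ ["("]) := by
  rw [valLoop.eq_def]; try simp [smk1, smk2, smk3, smk4, smk5, smk6]
theorem vl_lb (ts : List String) (stack : List String) :
    valLoop ("[" :: ts) stack = valLoop ts (stack ++ ["["]) := by
  rw [valLoop.eq_def]; try simp [smk1, smk2, smk3, smk4, smk5, smk6]
theorem vl_co (ts : List String) (stack : List String) :
    valLoop ("/*" :: ts) stack = valLoop ts (stack ++ ["/*"]) := by
  rw [valLoop.eq_def]; try simp [smk1, smk2, smk3, smk4, smk5, smk6]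
theorem vl_rp (ts : List String) (stack : List String) :
    valLoop (")" :: ts) stack =
      if stack.length ≠ 0 ∧ stack.getLast? = some "(" then valLoop ts stack.dropLast else 0 := by
  rw [valLoop.eq_def]; try simp [smk1, smk2, smk3, smk4, smk5, smk6]
theorem vl_rb (ts : List String) (stack : List String) :
    valLoop ("]" :: ts) stack =
      if stack.length ≠ 0 ∧ stack.getLast? = some "[" then valLoop ts stack.dropLast else 0 := by
  rw [valLoop.eq_def]; try simp [smk1, smk2, smk3, smk4, smk5, smk6]
theorem vl_cc (ts : List String) (stack : List String) :
    valLoop ("*/" :: ts) stack =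
      if stack.length ≠ 0 ∧ stack.getLast? = some "/*" then valLoop ts stack.dropLast else 0 := by
  rw [valLoop.eq_def]; try simp [smk1, smk2, smk3, smk4, smk5, smk6]

-- tokenizer accumulator lemma
theorem tokLoop_acc (n : Nat) : ∀ (cs : List Char), cs.length ≤ n → ∀ (toks : List String),
    tokLoop cs toks = (tokLoop cs []).map (toks ++ ·) := by
  induction n with
  | zero =>
    intro cs h toks
    have : cs = [] := List.eq_nil_of_length_eq_zero (Nat.le_zero.mp h)
    subst this; simp [tokLoop]
  | succ n ih =>
    intro cs h toks
    match cs with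
    | [] => simp [tokLoop]
    | c :: rest =>
      simp only [List.length_cons, Nat.succ_le_succ_iff] at h
      by_cases h1 : c = '(' ∨ c = ')' ∨ c = '[' ∨ c = ']'
      · rw [tokLoop, tokLoop, if_pos h1, if_pos h1]
        simp only [List.nil_append]
        rw [ih rest h (toks ++ [String.mk [c]]), ih rest h ([String.mk [c]])]
        cases tokLoop rest [] <;> simp
      · by_cases h2 : c = '/' ∨ c = '*'
        · rw [tokLoop, tokLoop, if_neg h1, if_neg h1, if_pos h2, if_pos h2]
          match rest with
          | [] => simp
          | d :: rest2 =>
            have h3 : rest2.length ≤ n := by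
              simp only [List.length_cons] at h; omega
            simp only [List.nil_append]
            by_cases hd : d = (if c = '/' then '*' else '/')
            · rw [if_pos hd, if_pos hd,
                ih rest2 h3 (toks ++ [String.mk [c, d]]), ih rest2 h3 ([String.mk [c, d]])]
              cases tokLoop rest2 [] <;> simp
            · rw [if_neg hd, if_neg hd]; rfl
        · rw [tokLoop, tokLoop, if_neg h1, if_neg h1, if_neg h2, if_neg h2,
            ih rest h toks, ih rest h []]

-- main lemma: A's fused loop equals B's tokenize-then-validate from the same stack
theorem main_lemma (n : Nat) : ∀ (cs : List Char), cs.length ≤ n → ∀ (lst : List String),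
    matchALoop cs lst =
      (match tokLoop cs [] with
       | none => 0
       | some ts => valLoop ts lst) := by
  induction n with
  | zero =>
    intro cs h lst
    have : cs = [] := List.eq_nil_of_length_eq_zero (Nat.le_zero.mp h)
    subst this
    rw [mA_nil, tk_nil]
    cases lst <;> simp [vl_nil]
  | succ n ih =>
    intro cs h lst
    match cs with
    | [] =>
      rw [mA_nil, tk_nil]
      cases lst <;> simp [vl_nil]
    | c :: rest =>
      simp only [List.length_cons, Nat.succ_le_succ_iff] at h
      have hrest := tokLoop_acc rest.length rest (le_refl _)
      by_cases h1 : c = '(' ∨ c = '['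
      · rcases h1 with h1 | h1 <;> subst h1
        · rw [mA_lp, tk_lp]; simp only [List.nil_append]; rw [hrest ["("], ih rest h (lst ++ ["("])]
          cases tokLoop rest [] with
          | none => rfl
          | some ts => simp only [Option.map_some, List.singleton_append]; rw [vl_lp]
        · rw [mA_lb, tk_lb]; simp only [List.nil_append]; rw [hrest ["["], ih rest h (lst ++ ["["])]
          cases tokLoop rest [] with
          | none => rfl
          | some ts => simp only [Option.map_some, List.singleton_append]; rw [vl_lb]
      · by_cases h2 : c = ')'
        · subst h2
          rw [mA_rp, tk_rp]; simp only [List.nil_append]; rw [hrest [")"]]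
          by_cases hg : lst.length = 0 ∨ lst.getLast? ≠ some "("
          · rw [if_pos hg]
            cases tokLoop rest [] with
            | none => rfl
            | some ts =>
              simp only [Option.map_some, List.singleton_append]
              rw [vl_rp, if_neg (by tauto)]
          · push_neg at hg
            rw [if_neg (by push_neg; exact hg), ih rest h lst.dropLast]
            cases tokLoop rest [] with
            | none => rfl
            | some ts =>
              simp only [Option.map_some, List.singleton_append]
              rw [vl_rp, if_pos hg]
        · by_cases h3 : c = ']'
          · subst h3
            rw [mA_rb, tk_rb]; simp only [List.nil_append]; rw [hrest ["]"]]
            by_cases hg : lst.length ≠ 0 ∧ lst.getLast? = some "["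
            · rw [if_pos hg, ih rest h lst.dropLast]
              cases tokLoop rest [] with
              | none => rfl
              | some ts =>
                simp only [Option.map_some, List.singleton_append]
                rw [vl_rb, if_pos hg]
            · rw [if_neg hg]
              cases tokLoop rest [] with
              | none => rfl
              | some ts =>
                simp only [Option.map_some, List.singleton_append]
                rw [vl_rb, if_neg hg]
          · by_cases h4 : c = '*'
            · subst h4
              match rest with
              | [] => rfl
              | d :: rest2 =>
                have h5 : rest2.length ≤ n := by
                  simp only [List.length_cons] at h; omega
                have hrest2 := tokLoop_acc rest2.length rest2 (le_refl _)
                by_cases hd : d = '/'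
                · subst hd
                  rw [mA_star_hit, tk_star_hit]; simp only [List.nil_append]; rw [hrest2 ["*/"]]
                  by_cases hg : lst.length ≠ 0 ∧ lst.getLast? = some "/*"
                  · rw [if_pos hg, ih rest2 h5 lst.dropLast]
                    cases tokLoop rest2 [] with
                    | none => rfl
                    | some ts =>
                      simp only [Option.map_some, List.singleton_append]
                      rw [vl_cc, if_pos hg]
                  · rw [if_neg hg]
                    cases tokLoop rest2 [] with
                    | none => rfl
                    | some ts =>
                      simp only [Option.map_some, List.singleton_append]
                      rw [vl_cc, if_neg hg]
                · rw [mA_star_miss rest2 d lst hd, tk_star_miss rest2 d [] hd]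
            · by_cases h6 : c = '/'
              · subst h6
                match rest with
                | [] => rfl
                | d :: rest2 =>
                  have h5 : rest2.length ≤ n := by
                    simp only [List.length_cons] at h; omega
                  have hrest2 := tokLoop_acc rest2.length rest2 (le_refl _)
                  by_cases hd : d = '*'
                  · subst hd
                    rw [mA_slash_hit, tk_slash_hit]; simp only [List.nil_append]; rw [hrest2 ["/*"],
                      ih rest2 h5 (lst ++ ["/*"])]
                    cases tokLoop rest2 [] with
                    | none => rfl
                    | some ts =>
                      simp only [Option.map_some, List.singleton_append]
                      rw [vl_co]
                  · rw [mA_slash_miss rest2 d lst hd, tk_slash_miss rest2 d [] hd]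
              · rw [mA_other rest c lst h1 h2 h3 h4 h6,
                  tk_other rest c [] (by tauto) (by tauto), ih rest h lst]

-- ===== VERDICT (by name: the statement is the Claim_ definition above) =====
theorem match_py_spec : Claim_equal_match_py := by
  intro word _
  unfold Spec_match_py match_py match_py_alt
  exact main_lemma word.toList.length word.toList (le_refl _) []
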